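-- pv_equiv track=rewrite | github.com/rlfscin/SisCom | qt.py | qt
-- ===== SOURCE A (Python) =====
-- def qt(tags):
--     queue = ['0', '1']
--     #memory = []
--
--     TAG_ID_LENGHT = len(tags[0])
--
--     bits_reader = 0
--     bits_tags = 0
--
--     while len(queue) > 0:
--         prefix = queue.pop(0)
--
--         found_tag = None
--
--         found_tags = [tag for tag in tags if tag.startswith(prefix)]
--
--         bits_reader += len(prefix)
--         bits_tags += len(found_tags) * TAG_ID_LENGHT
--
--         if len(found_tags) == 1:
--             #memory.append(found_tags[0])
--             pass
--         elif len(found_tags) > 1: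
--             queue.append(prefix + '0')
--             queue.append(prefix + '1')
--     return {"bits_reader": bits_reader, "bits_tags": bits_tags}
-- ===== SOURCE B (Python) =====
-- def qt(tags):
--     tag_id_length = len(tags[0])
--
--     def visit(prefix, cand):
--         # partition refinement: only tags that matched the parent are rescanned
--         hits = [t for t in cand if t.startswith(prefix)]
--         reader = len(prefix)
--         bits = len(hits) * tag_id_length
--         if len(hits) > 1:
--             r0, b0 = visit(prefix + "0", hits)
--             r1, b1 = visit(prefix + "1", hits)
--             reader += r0 + r1
--             bits += b0 + b1
--         return reader, bits
--
--     r0, b0 = visit("0", tags)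
--     r1, b1 = visit("1", tags)
--     return {"bits_reader": r0 + r1, "bits_tags": b0 + b1}
-- ===== Notes on version B (the rewrite author's own statement) =====
-- stated objective: alternative
-- what changed: A's BFS over a queue of prefixes re-filters the ENTIRE tag list at every query-tree node; B recurses depth-first and passes each node only the tags that matched its parent prefix (partition refinement), so each tag is rescanned only along its own path; Pre_ excludes only the empty list, where A raises IndexError on tags[0] (B raises there too).
import Mathlib
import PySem

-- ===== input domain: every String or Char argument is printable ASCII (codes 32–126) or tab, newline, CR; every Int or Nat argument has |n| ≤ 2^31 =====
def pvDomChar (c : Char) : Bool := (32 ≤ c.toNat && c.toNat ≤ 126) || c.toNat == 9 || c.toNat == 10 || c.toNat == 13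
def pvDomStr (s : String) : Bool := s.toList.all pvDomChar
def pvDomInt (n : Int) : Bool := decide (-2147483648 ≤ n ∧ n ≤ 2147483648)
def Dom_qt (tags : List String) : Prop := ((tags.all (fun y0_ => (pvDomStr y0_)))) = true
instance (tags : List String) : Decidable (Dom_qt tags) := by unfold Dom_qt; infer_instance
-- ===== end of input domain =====

-- B replaces A's BFS queue that re-scans the FULL tag list at every query-tree node by a
-- DFS recursion that passes only the tags matching the parent prefix down to the children
-- (partition refinement): a different traversal and a different per-node scan.

-- maximum tag length; used only in the termination measures of the recursions below

def qtMaxLen (tags : List String) : Nat := tags.foldr (fun t m => max t.toList.length m) 0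

theorem qtMaxLen_ge {tags : List String} {t : String} (h : t ∈ tags) :
    t.toList.length ≤ qtMaxLen tags := by
  induction tags with
  | nil => cases h
  | cons x xs ih =>
    simp only [qtMaxLen, List.foldr_cons] at *
    rcases List.mem_cons.1 h with rfl | h
    · exact Nat.le_max_left _ _
    · exact le_trans (ih h) (Nat.le_max_right _ _)

theorem qtMaxLen_mono {xs ys : List String} (h : ∀ t ∈ xs, t ∈ ys) :
    qtMaxLen xs ≤ qtMaxLen ys := by
  induction xs with
  | nil => simp [qtMaxLen]
  | cons x l ih =>
    have hx : x.toList.length ≤ qtMaxLen ys := qtMaxLen_ge (h x (by simp))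
    have hl : qtMaxLen l ≤ qtMaxLen ys := ih (fun t ht => h t (by simp [ht]))
    simp only [qtMaxLen, List.foldr_cons] at hx hl ⊢
    exact max_le hx hl

theorem qt_sw_len {t : String} {p : List Char}
    (h : PySem.Chars.startswith t.toList p = true) : p.length ≤ t.toList.length :=
  List.IsPrefix.length_le ((PySem.Chars.startswith_iff _ _).1 h)

theorem qt_filter_len {tags : List String} {p : List Char}
    (h : 1 ≤ (tags.filter (fun t => PySem.Chars.startswith t.toList p)).length) :
    p.length ≤ qtMaxLen tags := by
  have hne : (tags.filter (fun t => PySem.Chars.startswith t.toList p)) ≠ [] := by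
    intro hnil; rw [hnil] at h; simp at h
  rcases List.exists_mem_of_ne_nil _ hne with ⟨t, ht⟩
  have hm := List.mem_filter.1 ht
  exact le_trans (qt_sw_len hm.2) (qtMaxLen_ge hm.1)

-- ===== PORT A =====
-- A's while-loop over the FIFO queue of prefixes, transcribed with the same state
-- (the queue, the two bit counters); prefixes are the strings' char lists.

def qtLoopA (tags : List String) (L : Int) (queue : List (List Char)) (br bt : Int) :
    Int × Int :=
  match queue with
  | [] => (br, bt)
  | pre :: rest =>
    let found := tags.filter (fun t => PySem.Chars.startswith t.toList pre)
    let br' := br + (pre.length : Int)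
    let bt' := bt + (found.length : Int) * L
    if found.length = 1 then qtLoopA tags L rest br' bt'
    else if 1 < found.length then
      qtLoopA tags L (rest ++ [pre ++ ['0'], pre ++ ['1']]) br' bt'
    else qtLoopA tags L rest br' bt'
termination_by (queue.map (fun p => 3 ^ (qtMaxLen tags + 2 - p.length))).sum
decreasing_by
  · simp_wf
  · simp_wf
    rename_i h1 h2
    have h2' : 1 ≤ (tags.filter (fun t => PySem.Chars.startswith t.toList pre)).length := by
      simpa [found] using Nat.one_le_of_lt h2
    have hle : pre.length ≤ qtMaxLen tags := qt_filter_len h2'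
    have he : qtMaxLen tags + 2 - pre.length = (qtMaxLen tags + 1 - pre.length) + 1 := by
      omega
    rw [he, pow_succ]
    have h3 : 1 ≤ 3 ^ (qtMaxLen tags + 1 - pre.length) := Nat.one_le_pow _ _ (by norm_num)
    omega
  · simp_wf

def qt (tags : List String) : List (String × Int) :=
  match PySem.List.pyGet? tags 0 with
  | none => []
  | some t0 =>
    let L : Int := (PySem.Str.len t0 : Int)
    let r := qtLoopA tags L [['0'], ['1']] 0 0
    [("bits_reader", r.1), ("bits_tags", r.2)]

-- ===== PORT B =====
-- Source B's visit: DFS; only the tags that matched the parent prefix are filtered again.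

def qtVisit (L : Int) (pre : List Char) (cand : List String) : Int × Int :=
  let hits := cand.filter (fun t => PySem.Chars.startswith t.toList pre)
  let reader : Int := (pre.length : Int)
  let bits : Int := (hits.length : Int) * L
  if 1 < hits.length then
    let r0 := qtVisit L (pre ++ ['0']) hits
    let r1 := qtVisit L (pre ++ ['1']) hits
    (reader + (r0.1 + r1.1), bits + (r0.2 + r1.2))
  else (reader, bits)
termination_by qtMaxLen cand + 1 - pre.length
decreasing_by
  all_goals
    simp_wf
    rename_i h
    have h' : 1 ≤ (List.filter (fun x => PySem.Chars.startswith x.toList pre) cand).length := by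
      have := Nat.one_le_of_lt h
      simpa [hits, List.length_unattach] using this
    have hp : pre.length ≤ qtMaxLen cand := qt_filter_len (tags := cand) h'
    have hmono : qtMaxLen (List.filter (fun x => PySem.Chars.startswith x.toList pre) cand) ≤
        qtMaxLen cand := qtMaxLen_mono (fun t ht => (List.mem_filter.1 ht).1)
    omega

def qt_alt (tags : List String) : List (String × Int) :=
  match PySem.List.pyGet? tags 0 with
  | none => []
  | some t0 =>
    let L : Int := (PySem.Str.len t0 : Int)
    let r0 := qtVisit L ['0'] tags
    let r1 := qtVisit L ['1'] tags
    [("bits_reader", r0.1 + r1.1), ("bits_tags", r0.2 + r1.2)]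

-- ===== PRECONDITION & SPEC =====
-- Python A evaluates tags[0] first: on the empty list it raises IndexError, so exactly
-- the empty input is excluded (B raises there too).
def Pre_qt (tags : List String) : Prop := tags ≠ []
instance (tags : List String) : Decidable (Pre_qt tags) := by unfold Pre_qt; infer_instance
def pvWitness_qt : List String := ["0"]

def Spec_qt (tags : List String) (out : List (String × Int)) : Prop := out = qt_alt tags
instance (tags : List String) (out : List (String × Int)) : Decidable (Spec_qt tags out) := by
  unfold Spec_qt; infer_instance

-- ===== CLAIM (what is proved, stated in full; the proofs are below) =====
def Claim_equal_qt : Prop := ∀ (tags : List String), Dom_qt tags → Pre_qt tags → Spec_qt tags (qt tags)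

-- ===== LEMMAS AND PROOFS =====

-- reference recursion: the per-node contributions of the query tree rooted at a prefix

def qtT (tags : List String) (L : Int) (p : List Char) : Int × Int :=
  if h : 1 < (tags.filter (fun t => PySem.Chars.startswith t.toList p)).length then
    ((p.length : Int) + ((qtT tags L (p ++ ['0'])).1 + (qtT tags L (p ++ ['1'])).1),
     ((tags.filter (fun t => PySem.Chars.startswith t.toList p)).length : Int) * L
       + ((qtT tags L (p ++ ['0'])).2 + (qtT tags L (p ++ ['1'])).2))
  else ((p.length : Int),
    ((tags.filter (fun t => PySem.Chars.startswith t.toList p)).length : Int) * L)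
termination_by qtMaxLen tags + 1 - p.length
decreasing_by
  all_goals
    have hp : p.length ≤ qtMaxLen tags := qt_filter_len (Nat.one_le_of_lt h)
    simp only [List.length_append, List.length_cons, List.length_nil]
    omega

theorem qtT_low (tags : List String) (L : Int) (p : List Char)
    (h : ¬ 1 < (tags.filter (fun t => PySem.Chars.startswith t.toList p)).length) :
    qtT tags L p = ((p.length : Int),
      ((tags.filter (fun t => PySem.Chars.startswith t.toList p)).length : Int) * L) := by
  rw [qtT.eq_def, dif_neg h]

theorem qtT_high (tags : List String) (L : Int) (p : List Char)
    (h : 1 < (tags.filter (fun t => PySem.Chars.startswith t.toList p)).length) :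
    qtT tags L p = ((p.length : Int) + ((qtT tags L (p ++ ['0'])).1 + (qtT tags L (p ++ ['1'])).1),
      ((tags.filter (fun t => PySem.Chars.startswith t.toList p)).length : Int) * L
        + ((qtT tags L (p ++ ['0'])).2 + (qtT tags L (p ++ ['1'])).2)) := by
  rw [qtT.eq_def, dif_pos h]

theorem qt_sw_mono {t : String} {p : List Char} {c : Char}
    (h : PySem.Chars.startswith t.toList (p ++ [c]) = true) :
    PySem.Chars.startswith t.toList p = true := by
  rw [PySem.Chars.startswith_iff] at h ⊢
  exact (List.prefix_append _ _).trans h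

theorem qt_filter_step (tags cand : List String) (p : List Char) (c : Char)
    (h : cand.filter (fun t => PySem.Chars.startswith t.toList p)
       = tags.filter (fun t => PySem.Chars.startswith t.toList p)) :
    (cand.filter (fun t => PySem.Chars.startswith t.toList p)).filter
        (fun t => PySem.Chars.startswith t.toList (p ++ [c]))
      = tags.filter (fun t => PySem.Chars.startswith t.toList (p ++ [c])) := by
  rw [h, List.filter_filter]
  apply List.filter_congr
  intro t _
  cases hcb : PySem.Chars.startswith t.toList (p ++ [c]) with
  | false => simp
  | true => simp [qt_sw_mono hcb]

theorem qtVisit_eq_qtT (tags : List String) (L : Int) (p : List Char) (cand : List String)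
    (h : cand.filter (fun t => PySem.Chars.startswith t.toList p)
       = tags.filter (fun t => PySem.Chars.startswith t.toList p)) :
    qtVisit L p cand = qtT tags L p := by
  induction p, cand using qtVisit.induct L with
  | case1 p cand hits h1 ih0 ih1 =>
    simp only [hits, List.unattach_filter, List.unattach_attach] at h1 ih0 ih1
    rw [qtVisit, qtT]
    simp only [List.unattach_filter, List.unattach_attach]
    have h1t : 1 < (tags.filter (fun t => PySem.Chars.startswith t.toList p)).length := h ▸ h1
    rw [if_pos h1, dif_pos h1t]
    rw [ih0 (qt_filter_step tags cand p '0' h), ih1 (qt_filter_step tags cand p '1' h), h]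
  | case2 p cand hits h1 =>
    simp only [hits, List.unattach_filter, List.unattach_attach] at h1
    rw [qtVisit, qtT]
    simp only [List.unattach_filter, List.unattach_attach]
    have h1t : ¬ 1 < (tags.filter (fun t => PySem.Chars.startswith t.toList p)).length := h ▸ h1
    rw [if_neg h1, dif_neg h1t, h]

theorem qtLoopA_eq_sum (tags : List String) (L : Int) (queue : List (List Char)) (br bt : Int) :
    qtLoopA tags L queue br bt =
      (br + (queue.map (fun p => (qtT tags L p).1)).sum,
       bt + (queue.map (fun p => (qtT tags L p).2)).sum) := by
  induction queue, br, bt using qtLoopA.induct tags L with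
  | case1 br bt => simp [qtLoopA]
  | case2 br bt pre rest found br' bt' h1 ih =>
    simp only [found, br', bt', List.unattach_filter, List.unattach_attach] at h1 ih
    rw [qtLoopA]
    simp only [List.unattach_filter, List.unattach_attach, if_pos h1]
    rw [ih]
    simp only [List.map_cons, List.sum_cons]
    rw [qtT_low tags L pre (by rw [h1]; omega), h1]
    rw [Prod.ext_iff]
    constructor <;> simp <;> push_cast <;> ring
  | case3 br bt pre rest found br' bt' h1 h2 ih =>
    simp only [found, br', bt', List.unattach_filter, List.unattach_attach] at h1 h2 ih
    rw [qtLoopA]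
    simp only [List.unattach_filter, List.unattach_attach, if_neg h1, if_pos h2]
    rw [ih]
    simp only [List.map_cons, List.sum_cons, List.map_append, List.sum_append,
      List.map_nil, List.sum_nil]
    rw [qtT_high tags L pre h2]
    rw [Prod.ext_iff]
    constructor <;> simp <;> push_cast <;> ring
  | case4 br bt pre rest found br' bt' h1 h2 ih =>
    simp only [found, br', bt', List.unattach_filter, List.unattach_attach] at h1 h2 ih
    rw [qtLoopA]
    simp only [List.unattach_filter, List.unattach_attach, if_neg h1, if_neg h2]
    rw [ih]
    simp only [List.map_cons, List.sum_cons]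
    rw [qtT_low tags L pre h2]
    rw [Prod.ext_iff]
    constructor <;> simp <;> push_cast <;> ring

theorem qt_eq_qt_alt (tags : List String) : qt tags = qt_alt tags := by
  unfold qt qt_alt
  cases hget : PySem.List.pyGet? tags 0 with
  | none => rfl
  | some t0 =>
    simp only
    rw [qtLoopA_eq_sum]
    rw [qtVisit_eq_qtT tags _ ['0'] tags rfl, qtVisit_eq_qtT tags _ ['1'] tags rfl]
    simp [List.map_cons, List.sum_cons]

-- ===== VERDICT (by name: the statement is the Claim_ definition above) =====
theorem qt_spec : Claim_equal_qt := by
  intro tags _ _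
  exact qt_eq_qt_alt tags
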